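-- pv_equiv track=rewrite | github.com/iced-espresso/ProblemSolving | Programmers/81302_거리두기확인하기.py | hasClosePeople
-- ===== SOURCE A (Python) =====
-- from collections import deque
--
-- MAXR = 5
--
-- MAXC = 5
--
-- def getManDistance(r1,c1, r2,c2):
--     return abs(r1-r2) + abs(c1-c2)
--
-- def isOutOfRange(r,c):
--     return (r < 0 or r >= MAXR or c < 0 or c >= MAXC)
--
-- def hasClosePeople(place, row, col):
--     dr = [-1,1,0,0]
--     dc = [0,0,-1,1]
--     searchQ = deque()
--     searchQ.append([row, col])
--     while len(searchQ) > 0: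
--         currR, currC = searchQ.popleft()
--         dis = getManDistance(row,col, currR, currC)
--
--         if dis >= 2:
--             continue
--         searchPosList = [(currR+r,currC+c) for r,c in zip(dr,dc) if not isOutOfRange(currR+r, currC+c)]
--         for nextR, nextC in searchPosList:
--             if(nextR == row and nextC == col): continue
--             if place[nextR][nextC] == 'P':
--                 return True
--
--             if place[nextR][nextC] == 'O' and dis < getManDistance(row,col, nextR, nextC):
--                 searchQ.append([nextR, nextC])
--
--     return False
-- ===== SOURCE B (Python) =====
-- MAXR = 5
--
-- MAXC = 5
--
-- def isOutOfRange(r, c):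
--     return (r < 0 or r >= MAXR or c < 0 or c >= MAXC)
--
-- def hasClosePeople(place, row, col):
--     def isP(r, c):
--         return not isOutOfRange(r, c) and place[r][c] == 'P'
--
--     def isO(r, c):
--         return not isOutOfRange(r, c) and place[r][c] == 'O'
--
--     # distance 1: any orthogonally adjacent person violates distancing
--     if isP(row - 1, col) or isP(row + 1, col) or isP(row, col - 1) or isP(row, col + 1):
--         return True
--     # distance 2, straight line: reachable only through the single middle cell
--     for dr, dc in ((-2, 0), (2, 0), (0, -2), (0, 2)):
--         if isO(row + dr // 2, col + dc // 2) and isP(row + dr, col + dc):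
--             return True
--     # distance 2, diagonal: reachable through either of the two middle cells
--     for dr, dc in ((-1, -1), (-1, 1), (1, -1), (1, 1)):
--         if (isO(row + dr, col) or isO(row, col + dc)) and isP(row + dr, col + dc):
--             return True
--     return False
-- ===== Notes on version B (the rewrite author's own statement) =====
-- stated objective: simpler
-- what changed: Replaces A's queue-driven BFS (deque, Manhattan-distance bookkeeping, revisit checks) by a direct enumeration of the distancing rule: any orthogonally adjacent 'P', or a distance-2 'P' whose straight middle cell (or either diagonal middle cell) is an in-range 'O'.
-- outside the precondition, e.g. on hasClosePeople(['OP', 'XX', 'O'], 1, 0): A returns True, B raises IndexError; on hasClosePeople(['OOOOO', 'P'], 0, 0): A returns True, B returns True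
import Mathlib
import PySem

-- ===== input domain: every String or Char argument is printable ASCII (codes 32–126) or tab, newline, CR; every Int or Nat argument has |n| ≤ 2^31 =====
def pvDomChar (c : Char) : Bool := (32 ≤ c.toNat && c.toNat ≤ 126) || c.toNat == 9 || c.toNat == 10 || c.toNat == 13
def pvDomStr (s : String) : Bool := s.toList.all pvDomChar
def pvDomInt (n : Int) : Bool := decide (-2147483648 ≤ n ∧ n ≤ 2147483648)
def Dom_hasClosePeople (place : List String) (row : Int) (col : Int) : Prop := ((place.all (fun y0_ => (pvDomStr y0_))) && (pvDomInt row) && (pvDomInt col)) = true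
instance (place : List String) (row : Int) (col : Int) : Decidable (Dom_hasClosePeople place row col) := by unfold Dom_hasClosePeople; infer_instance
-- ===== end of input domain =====

-- B replaces A's BFS by a direct enumeration of the distancing rule (adjacent 'P', or a
-- distance-2 'P' reachable through an in-range 'O' middle cell): objective = simpler.

-- ===== PORT A =====
-- getManDistance(r1,c1,r2,c2)
def pvManDist (r1 c1 r2 c2 : Int) : Int := |r1 - r2| + |c1 - c2|

-- isOutOfRange(r,c) with MAXR = MAXC = 5
def pvOutOfRange (r c : Int) : Bool := decide (r < 0) || decide (5 ≤ r) || decide (c < 0) || decide (5 ≤ c)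

-- place[r][c]; exact for Python's positive in-range indices, which is the only way the
-- ports read it (guarded by pvOutOfRange and, for the string extents, by Pre_).
def pvCell (place : List String) (r c : Int) : Char :=
  (place.getD r.toNat "").toList.getD c.toNat ' '

-- the zip of dr and dc
def pvDirs : List (Int × Int) := [(-1, 0), (1, 0), (0, -1), (0, 1)]

-- searchPosList = [(currR+r,currC+c) for r,c in zip(dr,dc) if not isOutOfRange(...)]
def pvNbrs (cR cC : Int) : List (Int × Int) :=
  pvDirs.filterMap (fun d =>
    if pvOutOfRange (cR + d.1) (cC + d.2) then none else some (cR + d.1, cC + d.2))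

-- the while-loop over searchQ, with fuel making it total (the queue provably empties:
-- the run pops at most 17 entries, so fuel 32 is never exhausted).  The inner for-loop's
-- early 'return True' is the .any over searchPosList (appends made before a True are dead);
-- otherwise exactly the entries passing the 'O'-and-farther test are appended, in order.
def pvBfs (place : List String) (row col : Int) : Nat → List (Int × Int) → Bool
  | 0, _ => false
  | _ + 1, [] => false
  | fuel + 1, (currR, currC) :: rest =>
    if 2 ≤ pvManDist row col currR currC then pvBfs place row col fuel rest
    else if (pvNbrs currR currC).any (fun n =>
        !(decide (n.1 = row) && decide (n.2 = col)) && (pvCell place n.1 n.2 == 'P')) then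
      true
    else
      pvBfs place row col fuel (rest ++ (pvNbrs currR currC).filter (fun n =>
        !(decide (n.1 = row) && decide (n.2 = col)) && (pvCell place n.1 n.2 == 'O')
          && decide (pvManDist row col currR currC < pvManDist row col n.1 n.2)))

def hasClosePeople (place : List String) (row : Int) (col : Int) : Bool :=
  pvBfs place row col 32 [(row, col)]

-- ===== PORT B =====
def pvIsP (place : List String) (r c : Int) : Bool :=
  !pvOutOfRange r c && (pvCell place r c == 'P')

def pvIsO (place : List String) (r c : Int) : Bool :=
  !pvOutOfRange r c && (pvCell place r c == 'O')

def hasClosePeople_alt (place : List String) (row : Int) (col : Int) : Bool :=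
  if pvIsP place (row - 1) col || pvIsP place (row + 1) col
      || pvIsP place row (col - 1) || pvIsP place row (col + 1) then
    true
  else if ([((-2 : Int), (0 : Int)), (2, 0), (0, -2), (0, 2)]).any (fun d =>
      pvIsO place (row + PySem.Int.floordiv d.1 2) (col + PySem.Int.floordiv d.2 2)
        && pvIsP place (row + d.1) (col + d.2)) then
    true
  else ([((-1 : Int), (-1 : Int)), (-1, 1), (1, -1), (1, 1)]).any (fun d =>
    (pvIsO place (row + d.1) col || pvIsO place row (col + d.2))
      && pvIsP place (row + d.1) (col + d.2))

-- ===== PRECONDITION & SPEC =====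
-- cell (r,c) of place exists (so Python can index place[r][c] without an IndexError)
def pvPresent (place : List String) (r c : Int) : Prop :=
  r.toNat < place.length ∧ c.toNat < (place.getD r.toNat "").toList.length

-- an in-range middle cell holding 'O' (the condition under which the search walks through it)
def pvMidO (place : List String) (r c : Int) : Prop :=
  pvOutOfRange r c = false ∧ pvCell place r c = 'O'

-- Pre_ excludes inputs on which the 5x5 search can index a cell outside place's actual extent:
-- an in-range orthogonal neighbour that is missing, or a missing in-range distance-2 cell whose
-- middle cell(s) let the search reach it ('O' straight middle, either 'O' diagonal middle).
-- A raises IndexError on most of those inputs; on the rest an early 'P' hit merely happens to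
-- return before the missing cell is read, and which read happens first is an artefact of the
-- traversal order (A and B can raise or return differently there).
def Pre_hasClosePeople (place : List String) (row : Int) (col : Int) : Prop :=
  (∀ d ∈ ([(-1, 0), (1, 0), (0, -1), (0, 1)] : List (Int × Int)),
    pvOutOfRange (row + d.1) (col + d.2) = false → pvPresent place (row + d.1) (col + d.2)) ∧
  (∀ t ∈ ([((-2, 0), (-1, 0)), ((2, 0), (1, 0)), ((0, -2), (0, -1)), ((0, 2), (0, 1))] :
      List ((Int × Int) × (Int × Int))),
    pvOutOfRange (row + t.1.1) (col + t.1.2) = false →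
      pvMidO place (row + t.2.1) (col + t.2.2) → pvPresent place (row + t.1.1) (col + t.1.2)) ∧
  (∀ t ∈ ([((-1, -1), (-1, 0), (0, -1)), ((-1, 1), (-1, 0), (0, 1)),
           ((1, -1), (1, 0), (0, -1)), ((1, 1), (1, 0), (0, 1))] :
      List ((Int × Int) × (Int × Int) × (Int × Int))),
    pvOutOfRange (row + t.1.1) (col + t.1.2) = false →
      (pvMidO place (row + t.2.1.1) (col + t.2.1.2) ∨ pvMidO place (row + t.2.2.1) (col + t.2.2.2)) →
      pvPresent place (row + t.1.1) (col + t.1.2))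

instance (place : List String) (row : Int) (col : Int) : Decidable (Pre_hasClosePeople place row col) := by
  unfold Pre_hasClosePeople pvPresent pvMidO; infer_instance

def pvWitness_hasClosePeople : List String × Int × Int :=
  (["OOOOO", "OOOOO", "OOPOO", "OOOOO", "OOOOO"], 2, 2)

def Spec_hasClosePeople (place : List String) (row : Int) (col : Int) (out : Bool) : Prop := out = hasClosePeople_alt place row col
instance (place : List String) (row : Int) (col : Int) (out : Bool) : Decidable (Spec_hasClosePeople place row col out) := by unfold Spec_hasClosePeople; infer_instance

-- ===== CLAIM (what is proved, stated in full; the proofs are below) =====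
def Claim_equal_hasClosePeople : Prop := ∀ (place : List String) (row : Int) (col : Int), Dom_hasClosePeople place row col → Pre_hasClosePeople place row col → Spec_hasClosePeople place row col (hasClosePeople place row col)

-- ===== LEMMAS AND PROOFS =====

-- the 'P'-found test A applies to the neighbours of a popped cell
def pvFound (place : List String) (row col cR cC : Int) : Bool :=
  (pvNbrs cR cC).any (fun n =>
    !(decide (n.1 = row) && decide (n.2 = col)) && (pvCell place n.1 n.2 == 'P'))

lemma pvBfs_drain (place : List String) (row col : Int) :
    ∀ (fuel : Nat) (q : List (Int × Int)),
      (∀ p ∈ q, 2 ≤ pvManDist row col p.1 p.2) → pvBfs place row col fuel q = false := by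
  intro fuel
  induction fuel with
  | zero => intro q _; rfl
  | succ n ih =>
    intro q h
    cases q with
    | nil => rfl
    | cons p rest =>
      obtain ⟨cR, cC⟩ := p
      rw [pvBfs]
      rw [if_pos (h (cR, cC) (List.mem_cons_self))]
      exact ih rest (fun p hp => h p (List.mem_cons_of_mem _ hp))

lemma pvBfs_run (place : List String) (row col : Int) :
    ∀ (L junk : List (Int × Int)) (fuel : Nat),
      L.length < fuel →
      (∀ p ∈ L, pvManDist row col p.1 p.2 = 1) →
      (∀ p ∈ junk, 2 ≤ pvManDist row col p.1 p.2) →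
      pvBfs place row col fuel (L ++ junk) =
        L.any (fun q => pvFound place row col q.1 q.2) := by
  intro L
  induction L with
  | nil =>
    intro junk fuel _ _ hj
    simpa using pvBfs_drain place row col fuel junk hj
  | cons q L ih =>
    intro junk fuel hfuel hL hj
    obtain ⟨fuel, rfl⟩ : ∃ f, fuel = f + 1 := ⟨fuel - 1, by omega⟩
    obtain ⟨cR, cC⟩ := q
    have hd : pvManDist row col cR cC = 1 := hL (cR, cC) (List.mem_cons_self)
    rw [List.cons_append, pvBfs, if_neg (by omega)]
    by_cases hf : pvFound place row col cR cC
    · rw [if_pos (by simpa [pvFound] using hf)]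
      simp [hf]
    · rw [if_neg (by simpa [pvFound] using hf), List.append_assoc]
      have hjunk : ∀ p ∈ junk ++ (pvNbrs cR cC).filter (fun n =>
          !(decide (n.1 = row) && decide (n.2 = col)) && (pvCell place n.1 n.2 == 'O')
            && decide (pvManDist row col cR cC < pvManDist row col n.1 n.2)),
          2 ≤ pvManDist row col p.1 p.2 := by
        intro p hp
        rcases List.mem_append.mp hp with hp | hp
        · exact hj p hp
        · have hcond := List.of_mem_filter hp
          simp only [Bool.and_eq_true] at hcond
          have := of_decide_eq_true hcond.2
          omega
      rw [ih (junk ++ _) fuel (by simp at hfuel ⊢; omega)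
        (fun p hp => hL p (List.mem_cons_of_mem _ hp)) hjunk]
      rw [List.any_cons, (Bool.not_eq_true _).mp hf, Bool.false_or]

lemma mem_pvNbrs_dist (row col : Int) :
    ∀ p ∈ pvNbrs row col, pvManDist row col p.1 p.2 = 1 := by
  intro p hp
  simp [pvNbrs, pvDirs] at hp
  rcases hp with ⟨hnr, he⟩ | ⟨hnr, he⟩ | ⟨hnr, he⟩ | ⟨hnr, he⟩ <;>
    simp [← he, pvManDist]

lemma hasClosePeople_char (place : List String) (row col : Int) :
    hasClosePeople place row col =
      (pvFound place row col row col ||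
        ((pvNbrs row col).filter (fun n =>
          !(decide (n.1 = row) && decide (n.2 = col)) && (pvCell place n.1 n.2 == 'O')
            && decide (0 < pvManDist row col n.1 n.2))).any
          (fun q => pvFound place row col q.1 q.2)) := by
  rw [hasClosePeople, pvBfs]
  have h0 : pvManDist row col row col = 0 := by simp [pvManDist]
  rw [if_neg (by omega), h0]
  by_cases hf : pvFound place row col row col
  · rw [if_pos (by simpa [pvFound] using hf)]
    simp [hf]
  · rw [if_neg (by simpa [pvFound] using hf), List.nil_append]
    have hrun := pvBfs_run place row col ((pvNbrs row col).filter (fun n =>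
        !(decide (n.1 = row) && decide (n.2 = col)) && (pvCell place n.1 n.2 == 'O')
          && decide (0 < pvManDist row col n.1 n.2))) [] 31
      (by
        have h1 := List.length_filter_le (fun n : Int × Int =>
          !(decide (n.1 = row) && decide (n.2 = col)) && (pvCell place n.1 n.2 == 'O')
            && decide (0 < pvManDist row col n.1 n.2)) (pvNbrs row col)
        have h2 : (pvNbrs row col).length ≤ 4 := by
          rw [pvNbrs]
          exact (List.length_filterMap_le _ _).trans (by simp [pvDirs])
        omega)
      (fun p hp => mem_pvNbrs_dist row col p (List.mem_of_mem_filter hp)) (by simp)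
    rw [List.append_nil] at hrun
    rw [hrun, (Bool.not_eq_true _).mp hf, Bool.false_or]

lemma any_filterMap_guard (l : List (Int × Int)) (cR cC : Int) (h : Int × Int → Bool) :
    (l.filterMap (fun d =>
        if pvOutOfRange (cR + d.1) (cC + d.2) then none
        else some (cR + d.1, cC + d.2))).any h
      = l.any (fun d => !pvOutOfRange (cR + d.1) (cC + d.2) && h (cR + d.1, cC + d.2)) := by
  induction l with
  | nil => rfl
  | cons d l ih =>
    rw [List.filterMap_cons]
    split_ifs with hc <;> simp [*]

-- the Boolean core of the equivalence: distributing the two diagonal middle cells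
lemma pv_bool_id (pU pD pL pR oU oD oL oR s1 s2 s3 s4 d1 d2 d3 d4 : Bool) :
    (pU || (pD || (pL || pR)) ||
      (oU && (s1 || (d1 || d2)) ||
        (oD && (s2 || (d3 || d4)) ||
          (oL && (d1 || (d3 || s3)) || oR && (d2 || (d4 || s4)))))) =
    (pU || pD || pL || pR ||
      (oU && s1 || (oD && s2 || (oL && s3 || oR && s4)) ||
        ((oU || oL) && d1 || ((oU || oR) && d2 || ((oD || oL) && d3 || (oD || oR) && d4))))) := by
  revert pU pD pL pR oU oD oL oR s1 s2 s3 s4 d1 d2 d3 d4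
  decide

set_option maxHeartbeats 1000000 in
lemma char_eq_alt (place : List String) (row col : Int) :
    (pvFound place row col row col ||
      ((pvNbrs row col).filter (fun n =>
        !(decide (n.1 = row) && decide (n.2 = col)) && (pvCell place n.1 n.2 == 'O')
          && decide (0 < pvManDist row col n.1 n.2))).any
        (fun q => pvFound place row col q.1 q.2)) = hasClosePeople_alt place row col := by
  rw [hasClosePeople_alt]
  simp only [pvFound, List.any_filter, pvNbrs, any_filterMap_guard, pvManDist, pvDirs]
  simp only [List.any_cons, List.any_nil]
  norm_num
  have e1 : row + -1 + -1 = row + -2 := by ring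
  have e2 : row + 1 + 1 = row + 2 := by ring
  have e3 : col + -1 + -1 = col + -2 := by ring
  have e4 : col + 1 + 1 = col + 2 := by ring
  rw [e1, e2, e3, e4]
  have f1 := eq_false (show ¬(row + -2 = row) by omega)
  have f2 := eq_false (show ¬(row + 2 = row) by omega)
  have f3 := eq_false (show ¬(col + -2 = col) by omega)
  have f4 := eq_false (show ¬(col + 2 = col) by omega)
  simp only [f1, f2, f3, f4, decide_false, Bool.not_false, Bool.true_and]
  simp only [pvIsP, pvIsO, sub_eq_add_neg]
  rw [← Bool.and_assoc, ← Bool.and_assoc, ← Bool.and_assoc, ← Bool.and_assoc]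
  exact pv_bool_id _ _ _ _ _ _ _ _ _ _ _ _ _ _ _ _

-- ===== VERDICT (by name: the statement is the Claim_ definition above) =====
theorem hasClosePeople_spec : Claim_equal_hasClosePeople := by
  intro place row col _ _
  unfold Spec_hasClosePeople
  rw [hasClosePeople_char, char_eq_alt]
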